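-- pv_equiv track=rewrite | github.com/TejasviniVK/basics | python-test1.py | get_odd_mountain
-- ===== SOURCE A (Python) =====
-- def get_odd_mountain(count):
--     """
--     odd mountain is a list of odd numbers going up from 1 and then back to 1.
--      e.g. odd_mountain of size 5 is [1,3,5,3,1]
--     odd_mountain of size 4 is [1,3,3,1]
--
--     Hint: use the list functions and a builtin function we have already seen.
--     """
--     a_list = []
--     if  count == 0:
--         return []
--
--     elif count == 2:
--         return [1,1]
--     else:
--         for i in range(1,count,2):
--             a_list.append(i)
--         c = count-len(a_list)
--         o = c*2-1
--         for j in range(o,0,-2):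
--             a_list.append(j)
--     return a_list
-- ===== SOURCE B (Python) =====
-- def get_odd_mountain(count):
--     """
--     odd mountain is a list of odd numbers going up from 1 and then back to 1.
--      e.g. odd_mountain of size 5 is [1,3,5,3,1]
--     odd_mountain of size 4 is [1,3,3,1]
--     """
--     # closed form: position i holds 2*min(i, count-1-i)+1 (distance from nearest end)
--     return [2 * min(i, count - 1 - i) + 1 for i in range(count)]
-- ===== Notes on version B (the rewrite author's own statement) =====
-- stated objective: simpler
-- what changed: Replaces the two directional loops (ascending odds then a computed descending run) and the count==0/count==2 special cases with a single comprehension emitting the closed-form per-position value 2*min(i, count-1-i)+1.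
import Mathlib
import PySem

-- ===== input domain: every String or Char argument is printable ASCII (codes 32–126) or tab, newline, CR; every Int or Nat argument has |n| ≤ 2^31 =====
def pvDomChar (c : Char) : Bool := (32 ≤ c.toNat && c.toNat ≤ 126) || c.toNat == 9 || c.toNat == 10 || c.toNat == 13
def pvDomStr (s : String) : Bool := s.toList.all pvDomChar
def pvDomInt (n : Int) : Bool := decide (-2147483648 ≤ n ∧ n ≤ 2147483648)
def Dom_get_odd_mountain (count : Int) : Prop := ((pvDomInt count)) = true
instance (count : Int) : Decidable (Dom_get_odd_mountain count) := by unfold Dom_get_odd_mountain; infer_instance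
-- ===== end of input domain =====

-- B replaces A's two directional loops and the count==0/count==2 special cases with a single
-- closed-form pass (value 2*min(i, count-1-i)+1 at each position); objective: simpler.

-- ===== PORT A =====
def get_odd_mountain (count : Int) : List Int :=
  let a_list : List Int := []
  if count = 0 then []
  else if count = 2 then [1, 1]
  else
    let a_list := (PySem.List.pyRange 1 count 2).foldl (fun acc i => acc ++ [i]) a_list
    let c : Int := count - a_list.length
    let o : Int := c * 2 - 1
    (PySem.List.pyRange o 0 (-2)).foldl (fun acc j => acc ++ [j]) a_list

-- ===== PORT B =====
def get_odd_mountain_alt (count : Int) : List Int :=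
  (PySem.List.pyRange 0 count 1).map (fun i => 2 * min i (count - 1 - i) + 1)

-- ===== PRECONDITION & SPEC =====
def Spec_get_odd_mountain (count : Int) (out : List Int) : Prop := out = get_odd_mountain_alt count
instance (count : Int) (out : List Int) : Decidable (Spec_get_odd_mountain count out) := by unfold Spec_get_odd_mountain; infer_instance

-- ===== CLAIM (what is proved, stated in full; the proofs are below) =====
def Claim_equal_get_odd_mountain : Prop := ∀ (count : Int), Dom_get_odd_mountain count → Spec_get_odd_mountain count (get_odd_mountain count)

-- ===== LEMMAS AND PROOFS =====

-- For count = n > 0 outside A's special cases, both ports build the same list: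
-- A = ascending odds (range step 2) ++ descending odds (range step -2), B = the closed-form map.
theorem mountain_eq_of_pos (n : Nat) (h0 : (n : Int) ≠ 0) (h2 : (n : Int) ≠ 2) :
    get_odd_mountain (n : Int) = get_odd_mountain_alt (n : Int) := by
  have hup : PySem.List.pyRange 1 (n : Int) 2
      = (List.range (n / 2)).map (fun k : Nat => 1 + 2 * (k : Int)) := by
    rw [PySem.List.pyRange_of_pos _ _ (by norm_num)]
    congr 2
    split_ifs with h <;> omega
  have hdown : PySem.List.pyRange (((n : Int) - ((n / 2 : Nat) : Int)) * 2 - 1) 0 (-2)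
      = (List.range ((n + 1) / 2)).map
          (fun k : Nat => ((n : Int) - ((n / 2 : Nat) : Int)) * 2 - 1 + (-2) * (k : Int)) := by
    simp only [PySem.List.pyRange]
    norm_num
    congr 2
    split_ifs with h <;> omega
  have hB : PySem.List.pyRange 0 (n : Int) 1
      = (List.range n).map (fun k : Nat => ((0 : Int) + k)) := by
    rw [PySem.List.pyRange_one]
    congr 2
  simp only [get_odd_mountain, get_odd_mountain_alt, h0, h2, if_false,
    PySem.List.foldl_append_singleton, List.nil_append, hup, hB,
    List.length_map, List.length_range, List.map_map]
  rw [hdown]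
  apply List.ext_getElem
  · simp only [List.length_append, List.length_map, List.length_range]; omega
  · intro i hi1 hi2
    simp only [List.length_append, List.length_map, List.length_range] at hi1
    rw [List.getElem_append]
    simp only [List.length_map, List.length_range]
    split_ifs with h
    · simp only [List.getElem_map, List.getElem_range, Function.comp]
      rw [min_eq_left (by omega)]
      omega
    · simp only [List.getElem_map, List.getElem_range, Function.comp]
      rw [min_eq_right (by omega)]
      omega

-- For count ≤ 0 both ports produce [] (A's loops run over empty ranges).
theorem mountain_eq_nonpos (count : Int) (h : count ≤ 0) :
    get_odd_mountain count = get_odd_mountain_alt count := by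
  have hB : get_odd_mountain_alt count = [] := by
    simp only [get_odd_mountain_alt, PySem.List.pyRange_one,
      show (count - 0).toNat = 0 by omega]
    simp
  rw [hB]
  by_cases h0 : count = 0
  · simp [get_odd_mountain, h0]
  · have h2 : count ≠ 2 := by omega
    simp only [get_odd_mountain, h0, h2, if_false]
    rw [PySem.List.pyRange_of_pos _ _ (by norm_num), if_neg (by omega)]
    simp only [List.range_zero, List.map_nil, List.foldl_nil, List.length_nil]
    simp only [PySem.List.pyRange]
    norm_num
    rw [if_neg (by omega)]
    simp

-- ===== VERDICT (by name: the statement is the Claim_ definition above) =====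
theorem get_odd_mountain_spec : Claim_equal_get_odd_mountain := by
  intro count _
  unfold Spec_get_odd_mountain
  by_cases hneg : count ≤ 0
  · exact mountain_eq_nonpos count hneg
  · by_cases h2 : count = 2
    · subst h2; decide
    · have hc : count = ((count.toNat : Nat) : Int) := by omega
      rw [hc]
      exact mountain_eq_of_pos count.toNat (by omega) (by omega)
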